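-- pv_equiv track=rewrite | github.com/eliottcassidy2000/math | 04-computation/gs_ocf_bridge.py | partition_to_pstring
-- ===== SOURCE A (Python) =====
-- from collections import Counter, defaultdict
--
-- def partition_to_pstring(partition):
--     """Convert partition to p-monomial string like p_3^2*p_1."""
--     cnt = Counter(partition)
--     parts = []
--     for k in sorted(cnt.keys(), reverse=True):
--         if cnt[k] == 1:
--             parts.append(f"p_{k}")
--         else:
--             parts.append(f"p_{k}^{cnt[k]}")
--     return "*".join(parts)
-- ===== SOURCE B (Python) =====
-- def partition_to_pstring(partition):
--     """Convert partition to p-monomial string like p_3^2*p_1."""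
--     s = sorted(partition, reverse=True)
--     parts = []
--     i = 0
--     n = len(s)
--     while i < n:
--         k = s[i]
--         j = i + 1
--         while j < n and s[j] == k:
--             j += 1
--         c = j - i
--         parts.append(f"p_{k}" if c == 1 else f"p_{k}^{c}")
--         i = j
--     return "*".join(parts)
-- ===== Notes on version B (the rewrite author's own statement) =====
-- stated objective: alternative
-- what changed: B replaces the Counter dict plus a separate sort of its distinct keys by one descending sort of the whole partition followed by a single run-length scan (consecutive runs give the multiplicities).
import Mathlib
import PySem

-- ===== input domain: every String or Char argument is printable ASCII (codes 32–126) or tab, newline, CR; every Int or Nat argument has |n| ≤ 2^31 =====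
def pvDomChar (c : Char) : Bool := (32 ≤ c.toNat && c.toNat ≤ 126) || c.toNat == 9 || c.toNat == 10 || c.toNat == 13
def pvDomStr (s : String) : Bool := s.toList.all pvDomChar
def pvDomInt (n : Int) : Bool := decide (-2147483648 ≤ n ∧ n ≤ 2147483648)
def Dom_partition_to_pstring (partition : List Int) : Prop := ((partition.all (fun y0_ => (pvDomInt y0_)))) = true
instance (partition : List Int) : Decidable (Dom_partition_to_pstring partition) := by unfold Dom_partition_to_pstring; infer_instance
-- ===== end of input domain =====

-- B replaces the Counter dict plus a separate sort of its distinct keys by one descending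
-- sort of the whole partition followed by a single run-length scan (objective: alternative).

-- ===== PORT A =====
def partition_to_pstring (partition : List Int) : String :=
  let cnt := PySem.Dict.counter partition
  let parts := (PySem.List.sorted cnt.keys (fun x => x) true).foldl
    (fun parts k =>
      if cnt.getD k 0 == 1 then parts ++ ["p_" ++ PySem.Int.toStr k]
      else parts ++ ["p_" ++ PySem.Int.toStr k ++ "^" ++ PySem.Int.toStr (cnt.getD k 0)]) []
  PySem.Str.join "*" parts

-- ===== PORT B =====
-- inner while loop of Source B: length of the run of k at the front of the rest, and the remainder
def pvRun (k : Int) : List Int → Nat × List Int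
  | [] => (0, [])
  | x :: xs => if x = k then let p := pvRun k xs; (p.1 + 1, p.2) else (0, x :: xs)

-- cited by pvGroups's decreasing_by
theorem pvRun_snd_length (k : Int) (xs : List Int) : (pvRun k xs).2.length ≤ xs.length := by
  induction xs with
  | nil => simp [pvRun]
  | cons x xs ih =>
    simp only [pvRun]
    split
    · exact Nat.le_succ_of_le ih
    · simp

-- the conditional expression inside Source B's append
def pvEmit (k c : Int) : String :=
  if c == 1 then "p_" ++ PySem.Int.toStr k
  else "p_" ++ PySem.Int.toStr k ++ "^" ++ PySem.Int.toStr c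

-- outer while loop of Source B over the descending-sorted list
def pvGroups : List Int → List String
  | [] => []
  | k :: xs =>
    let p := pvRun k xs
    pvEmit k ((p.1 : Int) + 1) :: pvGroups p.2
termination_by s => s.length
decreasing_by exact Nat.lt_succ_of_le (pvRun_snd_length k xs)

def partition_to_pstring_alt (partition : List Int) : String :=
  PySem.Str.join "*" (pvGroups (PySem.List.sorted partition (fun x => x) true))

-- ===== PRECONDITION & SPEC =====
def Spec_partition_to_pstring (partition : List Int) (out : String) : Prop := out = partition_to_pstring_alt partition
instance (partition : List Int) (out : String) : Decidable (Spec_partition_to_pstring partition out) := by unfold Spec_partition_to_pstring; infer_instance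

-- ===== CLAIM (what is proved, stated in full; the proofs are below) =====
def Claim_equal_partition_to_pstring : Prop := ∀ (partition : List Int), Dom_partition_to_pstring partition → Spec_partition_to_pstring partition (partition_to_pstring partition)

-- ===== LEMMAS AND PROOFS =====

theorem pvRun_eq (k : Int) (xs : List Int) :
    xs = List.replicate (pvRun k xs).1 k ++ (pvRun k xs).2 := by
  induction xs with
  | nil => simp [pvRun]
  | cons x xs ih =>
    simp only [pvRun]
    split
    · next h => simpa [List.replicate_succ, h] using ih
    · simp

theorem pvRun_not_mem (k : Int) (xs : List Int)
    (hle : ∀ a ∈ xs, a ≤ k) (hp : xs.Pairwise (fun a b => b ≤ a)) :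
    k ∉ (pvRun k xs).2 := by
  induction xs with
  | nil => simp [pvRun]
  | cons x xs ih =>
    simp only [pvRun]
    split
    · next h =>
      exact ih (fun a ha => hle a (List.mem_cons_of_mem _ ha)) hp.of_cons
    · next h =>
      have hx : x < k := lt_of_le_of_ne (hle x List.mem_cons_self) h
      intro hk
      rcases List.mem_cons.mp hk with rfl | hk
      · exact h rfl
      · exact absurd (List.rel_of_pairwise_cons hp hk) (not_le.mpr hx)

theorem foldl_append_map (f : Int → String) (l : List Int) (acc : List String) :
    l.foldl (fun acc k => acc ++ [f k]) acc = acc ++ l.map f := by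
  induction l generalizing acc with
  | nil => simp
  | cons x l ih => simp [List.foldl_cons, ih]

theorem pvGroups_spec (n : Nat) : ∀ (s : List Int), s.length ≤ n →
    s.Pairwise (fun a b => b ≤ a) →
    ∃ ks : List Int, ks.Nodup ∧ (∀ a, a ∈ ks ↔ a ∈ s) ∧ ks.Pairwise (fun a b => b < a) ∧
      pvGroups s = ks.map (fun k => pvEmit k ((s.count k : Int))) := by
  induction n with
  | zero =>
    intro s hlen _
    have : s = [] := List.eq_nil_of_length_eq_zero (Nat.le_zero.mp hlen)
    subst this
    exact ⟨[], by simp, by simp, by simp, by simp [pvGroups]⟩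
  | succ n ih =>
    intro s hlen hp
    match s with
    | [] => exact ⟨[], by simp, by simp, by simp, by simp [pvGroups]⟩
    | k :: xs =>
      have hxs_le : ∀ a ∈ xs, a ≤ k := fun a ha => List.rel_of_pairwise_cons hp ha
      have hp_xs : xs.Pairwise (fun a b => b ≤ a) := hp.of_cons
      set c := (pvRun k xs).1 with hc
      set r := (pvRun k xs).2 with hr
      have hrep : xs = List.replicate c k ++ r := pvRun_eq k xs
      have hkr : k ∉ r := pvRun_not_mem k xs hxs_le hp_xs
      have hsuf : r <:+ xs := ⟨List.replicate c k, hrep.symm⟩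
      have hr_pair : r.Pairwise (fun a b => b ≤ a) := hp_xs.sublist hsuf.sublist
      have hrlen : r.length ≤ n := by
        have h1 : r.length ≤ xs.length := pvRun_snd_length k xs
        have h2 : xs.length ≤ n := by simpa using hlen
        exact le_trans h1 h2
      obtain ⟨ks', hnd', hmem', hlt', hg'⟩ := ih r hrlen hr_pair
      have hrlt : ∀ a ∈ r, a < k := by
        intro a ha
        have h1 : a ≤ k := hxs_le a (hsuf.sublist.mem ha)
        exact lt_of_le_of_ne h1 (fun h => hkr (h ▸ ha))
      have hk_not : k ∉ ks' := fun h => hkr ((hmem' k).mp h)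
      refine ⟨k :: ks', List.nodup_cons.mpr ⟨hk_not, hnd'⟩, ?_, ?_, ?_⟩
      · intro a
        constructor
        · intro ha
          rcases List.mem_cons.mp ha with rfl | ha
          · exact List.mem_cons_self
          · exact List.mem_cons_of_mem _ (by rw [hrep]; exact List.mem_append_right _ ((hmem' a).mp ha))
        · intro ha
          rcases List.mem_cons.mp ha with rfl | ha
          · exact List.mem_cons_self
          · rw [hrep] at ha
            rcases List.mem_append.mp ha with ha | ha
            · have := (List.mem_replicate.mp ha).2
              subst this; exact List.mem_cons_self
            · exact List.mem_cons_of_mem _ ((hmem' a).mpr ha)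
      · exact List.pairwise_cons.mpr ⟨fun a ha => hrlt a ((hmem' a).mp ha), hlt'⟩
      · have hcount_k : (k :: xs).count k = c + 1 := by
          rw [List.count_cons_self, hrep, List.count_append, List.count_replicate_self,
            List.count_eq_zero.mpr hkr]
        have hgr : pvGroups (k :: xs) = pvEmit k ((c : Int) + 1) :: pvGroups r := by
          rw [pvGroups]
        have hcast : ((c : Int) + 1) = ((c + 1 : Nat) : Int) := by push_cast; ring
        rw [hgr, hg', List.map_cons, hcount_k, ← hcast]
        congr 1
        refine List.map_congr_left (fun a ha => ?_)
        have hak : a ≠ k := fun h => hkr (h ▸ (hmem' a).mp ha)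
        have hcr : (k :: xs).count a = r.count a := by
          simp [hrep, List.count_append, List.count_replicate, Ne.symm hak]
        rw [hcr]

theorem partition_to_pstring_eq_alt (partition : List Int) :
    partition_to_pstring partition = partition_to_pstring_alt partition := by
  have hp := PySem.List.sorted_pairwise_rev partition (fun x => x)
  obtain ⟨ks, hnd, hmem, hlt, hg⟩ :=
    pvGroups_spec (PySem.List.sorted partition (fun x => x) true).length
      (PySem.List.sorted partition (fun x => x) true) le_rfl hp
  have hperm : (PySem.List.sorted partition (fun x => x) true).Perm partition :=
    PySem.List.sorted_perm partition (fun x => x) true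
  have hpermks : ks.Perm (PySem.Set.ofList partition) :=
    (List.perm_ext_iff_of_nodup hnd (PySem.Set.nodup_ofList partition)).mpr
      (fun a => ((hmem a).trans hperm.mem_iff).trans (PySem.Set.mem_ofList partition a).symm)
  have hsorted : PySem.List.sorted (PySem.Set.ofList partition) (fun x => x) true = ks :=
    PySem.List.sorted_rev_eq_of_perm_of_pairwise_gt _ ks (fun x => x) hpermks hlt
  unfold partition_to_pstring partition_to_pstring_alt
  simp only [PySem.Dict.keys_counter, hsorted, hg]
  have hfun : (fun (parts : List String) (k : Int) =>
      if (PySem.Dict.counter partition).getD k 0 == 1 then parts ++ ["p_" ++ PySem.Int.toStr k]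
      else parts ++ ["p_" ++ PySem.Int.toStr k ++ "^" ++ PySem.Int.toStr ((PySem.Dict.counter partition).getD k 0)]) =
      (fun parts k => parts ++ [if (PySem.Dict.counter partition).getD k 0 == 1
        then "p_" ++ PySem.Int.toStr k
        else "p_" ++ PySem.Int.toStr k ++ "^" ++ PySem.Int.toStr ((PySem.Dict.counter partition).getD k 0)]) := by
    funext parts k
    exact (apply_ite (fun s => parts ++ [s]) _ _ _).symm
  rw [hfun, foldl_append_map, List.nil_append]
  congr 1
  refine List.map_congr_left (fun k hk => ?_)
  have hcnt : (PySem.Dict.counter partition).getD k 0 =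
      (((PySem.List.sorted partition (fun x => x) true).count k : Int)) := by
    rw [PySem.Dict.getD_counter, hperm.count_eq]
  rw [hcnt, pvEmit]

-- ===== VERDICT (by name: the statement is the Claim_ definition above) =====
theorem partition_to_pstring_spec : Claim_equal_partition_to_pstring := by
  intro partition _
  exact partition_to_pstring_eq_alt partition
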